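-- pv_equiv track=rewrite | github.com/bvddw/python | python basics/codewars/cw_Max sum between two negative.py | max_sum_between_two_negatives
-- ===== SOURCE A (Python) =====
-- def max_sum_between_two_negatives(arr):
--     sum_between = 0  # сума між двома від'ємними
--     max_sum = 0   # максимальна сума між двома від'ємними
--     count = 0  # лічільник від'ємних чисел
--     while len(arr) and arr[0] >= 0: # видаляємо усе до першого від'ємного числа
--         arr.pop(0)
--     for i in range(len(arr)):  # ідемо по масиву, рахуємо суму між двома від'ємними, перевіряючи чи є вона максимальною
--         if arr[i] >= 0:
--             sum_between += arr[i]
--         if arr[i] < 0: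
--             count += 1
--             max_sum = sum_between if max_sum < sum_between else max_sum
--             sum_between = 0
--     if count < 2: return -1
--     return max_sum
-- ===== SOURCE B (Python) =====
-- def max_sum_between_two_negatives(arr):
--     # same in-place effect as A: strip everything before the first negative
--     first = next((i for i, x in enumerate(arr) if x < 0), len(arr))
--     del arr[:first]
--     negs = [i for i, x in enumerate(arr) if x < 0]
--     if len(negs) < 2:
--         return -1
--     best = 0
--     for a, b in zip(negs, negs[1:]):
--         s = sum(arr[a + 1:b])
--         if s > best:
--             best = s
--     return best
-- ===== Notes on version B (the rewrite author's own statement) =====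
-- stated objective: alternative
-- what changed: Replaces A's single-pass accumulator state machine (running sum, running max, negative counter) by an index-based decomposition: collect the positions of the negatives once, then take the max over sum(arr[a+1:b]) for consecutive negative positions.
import Mathlib
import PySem

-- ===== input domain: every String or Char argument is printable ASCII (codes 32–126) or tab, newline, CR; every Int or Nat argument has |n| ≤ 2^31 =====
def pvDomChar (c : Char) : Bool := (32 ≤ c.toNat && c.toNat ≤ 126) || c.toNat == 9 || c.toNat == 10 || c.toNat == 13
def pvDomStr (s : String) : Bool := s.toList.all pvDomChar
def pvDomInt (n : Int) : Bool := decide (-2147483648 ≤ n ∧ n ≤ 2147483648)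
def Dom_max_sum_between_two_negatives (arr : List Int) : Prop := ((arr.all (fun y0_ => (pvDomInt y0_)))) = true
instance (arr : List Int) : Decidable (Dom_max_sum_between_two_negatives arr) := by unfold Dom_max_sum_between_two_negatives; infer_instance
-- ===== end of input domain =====

-- B replaces A's one-pass accumulator state machine by "collect negative positions, max of
-- slice sums between consecutive ones" (objective: alternative decomposition, not faster).
-- Both Pythons mutate arr identically (strip everything before the first negative); the
-- equivalence proved here is about the return value.

-- ===== PORT A =====
-- while len(arr) and arr[0] >= 0: arr.pop(0)
def pvStrip : List Int → List Int
  | [] => []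
  | x :: xs => if x ≥ 0 then pvStrip xs else x :: xs

-- the body of A's for-loop, state (sum_between, max_sum, count)
def pvStepA (st : Int × Int × Int) (x : Int) : Int × Int × Int :=
  let s := if x ≥ 0 then st.1 + x else st.1
  if x < 0 then (0, if st.2.1 < s then s else st.2.1, st.2.2 + 1)
  else (s, st.2.1, st.2.2)

def max_sum_between_two_negatives (arr : List Int) : Int :=
  let t := pvStrip arr
  let st := t.foldl pvStepA (0, 0, 0)
  if st.2.2 < 2 then -1 else st.2.1

-- ===== PORT B =====
-- next((i for i, x in enumerate(arr) if x < 0), len(arr))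
def pvFirstNeg (arr : List Int) : Int :=
  match (PySem.List.enumerate arr 0).find? (fun p => decide (p.2 < 0)) with
  | some p => p.1
  | none => (arr.length : Int)

-- body of B's pair loop: s = sum(arr[a+1:b]); best = s if s > best else best
def pvPairStep (t : List Int) (best : Int) (ab : Int × Int) : Int :=
  let s := (PySem.List.slice t (some (ab.1 + 1)) (some ab.2)).sum
  if s > best then s else best

def max_sum_between_two_negatives_alt (arr : List Int) : Int :=
  let t := PySem.List.slice arr (some (pvFirstNeg arr)) none   -- del arr[:first]
  let negs := (PySem.List.enumerate t 0).filterMap (fun p => if p.2 < 0 then some p.1 else none)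
  if negs.length < 2 then -1
  else (negs.zip negs.tail).foldl (pvPairStep t) 0

-- ===== PRECONDITION & SPEC =====
def Spec_max_sum_between_two_negatives (arr : List Int) (out : Int) : Prop := out = max_sum_between_two_negatives_alt arr
instance (arr : List Int) (out : Int) : Decidable (Spec_max_sum_between_two_negatives arr out) := by unfold Spec_max_sum_between_two_negatives; infer_instance

-- ===== CLAIM (what is proved, stated in full; the proofs are below) =====
def Claim_equal_max_sum_between_two_negatives : Prop := ∀ (arr : List Int), Dom_max_sum_between_two_negatives arr → Spec_max_sum_between_two_negatives arr (max_sum_between_two_negatives arr)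

-- ===== LEMMAS AND PROOFS =====

-- index of the first negative (or length), Nat-valued
def pvFnn : List Int → Nat
  | [] => 0
  | x :: xs => if x < 0 then 0 else pvFnn xs + 1

-- Nat positions of the negatives
def pvNidx : List Int → List Nat
  | [] => []
  | x :: xs => if x < 0 then 0 :: (pvNidx xs).map (· + 1) else (pvNidx xs).map (· + 1)

-- the sums A's loop emits at each negative, starting from accumulator s
def pvSegs : List Int → Int → List Int
  | [], _ => []
  | x :: xs, s => if x < 0 then s :: pvSegs xs 0 else pvSegs xs (s + x)

def pvMx (m s : Int) : Int := if m < s then s else m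

-- B's slice sums between consecutive negative positions, Nat-indexed
def pvPairSums (l : List Int) : List Int :=
  ((pvNidx l).zip (pvNidx l).tail).map
    (fun p => ((l.drop (p.1 + 1)).take (p.2 - (p.1 + 1))).sum)

lemma pvDrop_fnn (l : List Int) : l.drop (pvFnn l) = pvStrip l := by
  induction l with
  | nil => rfl
  | cons x xs ih =>
    by_cases h : x < 0
    · simp [pvFnn, pvStrip, h, not_le.mpr h]
    · simp [pvFnn, pvStrip, h, not_lt.mp h, ih]

lemma pvFind_none (l : List Int) (s : Int)
    (h : (PySem.List.enumerate l s).find? (fun p => decide (p.2 < 0)) = none) :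
    pvFnn l = l.length := by
  induction l generalizing s with
  | nil => rfl
  | cons x xs ih =>
    rw [PySem.List.enumerate_cons] at h
    by_cases hx : x < 0
    · simp [hx] at h
    · simp only [List.find?_cons] at h
      simp only [hx, decide_false] at h
      simp [pvFnn, hx, ih (s + 1) h]

lemma pvFind_some (l : List Int) (s : Int) (p : Int × Int)
    (h : (PySem.List.enumerate l s).find? (fun q => decide (q.2 < 0)) = some p) :
    p.1 = s + (pvFnn l : Int) := by
  induction l generalizing s with
  | nil => simp [PySem.List.enumerate] at h
  | cons x xs ih =>
    rw [PySem.List.enumerate_cons] at h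
    by_cases hx : x < 0
    · simp [hx] at h
      simp [← h, pvFnn, hx]
    · simp only [List.find?_cons, hx, decide_false] at h
      have := ih (s + 1) h
      simp only [pvFnn, hx, if_false] at this ⊢
      rw [this]
      push_cast
      ring

lemma pvFirstNeg_eq (arr : List Int) : pvFirstNeg arr = (pvFnn arr : Int) := by
  unfold pvFirstNeg
  cases h : (PySem.List.enumerate arr 0).find? (fun p => decide (p.2 < 0)) with
  | none => simp [pvFind_none arr 0 h]
  | some p => simpa using pvFind_some arr 0 p h

lemma pvStrip_head (l : List Int) (y : Int) (ys : List Int) (h : pvStrip l = y :: ys) : y < 0 := by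
  induction l with
  | nil => simp [pvStrip] at h
  | cons x xs ih =>
    by_cases hx : x ≥ 0
    · exact ih (by simpa [pvStrip, hx] using h)
    · simp [pvStrip, hx] at h
      omega

lemma pvEnum_filter (l : List Int) (s : Int) :
    (PySem.List.enumerate l s).filterMap (fun p => if p.2 < 0 then some p.1 else none)
      = (pvNidx l).map (fun (k : Nat) => s + (k : Int)) := by
  induction l generalizing s with
  | nil => simp [PySem.List.enumerate, pvNidx]
  | cons x xs ih =>
    rw [PySem.List.enumerate_cons, List.filterMap_cons]
    by_cases hx : x < 0
    · simp only [hx, if_true, pvNidx, List.map_cons, Nat.cast_zero, add_zero, ih (s + 1),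
        List.map_map]
      exact congrArg (List.cons s) (List.map_congr_left (by intro k _; simp only [Function.comp_apply]; push_cast; ring))
    · simp only [hx, if_false, pvNidx, ih (s + 1), List.map_map]
      exact List.map_congr_left (by intro k _; simp only [Function.comp_apply]; push_cast; ring)

lemma pvSegs_tail (l : List Int) (s s' : Int) : (pvSegs l s).tail = (pvSegs l s').tail := by
  induction l generalizing s s' with
  | nil => rfl
  | cons x xs ih =>
    by_cases hx : x < 0 <;> simp [pvSegs, hx]
    exact ih (s + x) (s' + x)

lemma pvSegs_len (l : List Int) (s : Int) : (pvSegs l s).length = (pvNidx l).length := by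
  induction l generalizing s with
  | nil => rfl
  | cons x xs ih => by_cases hx : x < 0 <;> simp [pvSegs, pvNidx, hx, ih]

lemma pvSegs_head (l : List Int) (k : Nat) (ks : List Nat) (h : pvNidx l = k :: ks) (s : Int) :
    pvSegs l s = (s + (l.take k).sum) :: (pvSegs l 0).tail := by
  induction l generalizing k ks s with
  | nil => simp [pvNidx] at h
  | cons x xs ih =>
    by_cases hx : x < 0
    · simp [pvNidx, hx] at h
      obtain ⟨hk, -⟩ := h
      simp [pvSegs, hx, ← hk]
    · simp only [pvNidx, hx, if_false] at h
      cases hns : pvNidx xs with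
      | nil => simp [hns] at h
      | cons k' ks' =>
        rw [hns] at h
        simp at h
        obtain ⟨hk, -⟩ := h
        have h1 := ih k' ks' hns (s + x)
        have h2 : (pvSegs xs x).tail = (pvSegs xs 0).tail := pvSegs_tail xs x 0
        simp [pvSegs, hx, h1, ← hk, List.take_succ_cons, h2]
        ring

-- shifting every index by one undoes a cons on the list being sliced
lemma pvPairShift (x : Int) (l : List Int) (ns ms : List Nat) :
    ((ns.map (· + 1)).zip (ms.map (· + 1))).map
        (fun p => (((x :: l).drop (p.1 + 1)).take (p.2 - (p.1 + 1))).sum)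
      = (ns.zip ms).map (fun p => ((l.drop (p.1 + 1)).take (p.2 - (p.1 + 1))).sum) := by
  rw [List.zip_map, List.map_map]
  apply List.map_congr_left
  intro p _
  have h1 : p.2 + 1 - (p.1 + 1 + 1) = p.2 - (p.1 + 1) := by omega
  simp [Prod.map, h1]

lemma pvMapTail {α β : Type} (f : α → β) (l : List α) : (l.map f).tail = l.tail.map f := by
  cases l <;> simp

lemma pvPairSums_eq (l : List Int) : pvPairSums l = (pvSegs l 0).tail := by
  induction l with
  | nil => rfl
  | cons x xs ih =>
    by_cases hx : x < 0
    · have hnx : pvNidx (x :: xs) = 0 :: (pvNidx xs).map (· + 1) := by simp [pvNidx, hx]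
      have hsx : (pvSegs (x :: xs) 0).tail = pvSegs xs 0 := by simp [pvSegs, hx]
      rw [hsx]
      cases hns : pvNidx xs with
      | nil =>
        have hnil : pvSegs xs 0 = [] :=
          List.eq_nil_of_length_eq_zero (by simp [pvSegs_len, hns])
        simp [pvPairSums, hnx, hns, hnil]
      | cons k ks =>
        unfold pvPairSums
        rw [hnx, hns, List.map_cons, List.tail_cons, List.zip_cons_cons, List.map_cons]
        rw [pvSegs_head xs k ks hns 0]
        congr 1
        · simp
        · have hsh := pvPairShift x xs (k :: ks) ks
          simp only [List.map_cons] at hsh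
          rw [hsh]
          have hPS : ((k :: ks).zip ks).map
              (fun p => ((xs.drop (p.1 + 1)).take (p.2 - (p.1 + 1))).sum) = pvPairSums xs := by
            unfold pvPairSums
            rw [hns]
            rfl
          rw [hPS, ih]
    · have hnx : pvNidx (x :: xs) = (pvNidx xs).map (· + 1) := by simp [pvNidx, hx]
      have hsx : (pvSegs (x :: xs) 0).tail = (pvSegs xs 0).tail := by
        have h0 : pvSegs (x :: xs) 0 = pvSegs xs (0 + x) := by
          simp only [pvSegs, hx, if_false]
        rw [h0]
        exact pvSegs_tail xs (0 + x) 0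
      unfold pvPairSums
      rw [hnx, pvMapTail, pvPairShift x xs (pvNidx xs) ((pvNidx xs).tail)]
      have hPS : ((pvNidx xs).zip (pvNidx xs).tail).map
          (fun p => ((xs.drop (p.1 + 1)).take (p.2 - (p.1 + 1))).sum) = pvPairSums xs := rfl
      rw [hPS, ih, hsx]

lemma pvLoopA (l : List Int) (s m c : Int) :
    ∃ r, l.foldl pvStepA (s, m, c)
      = (r, (pvSegs l s).foldl pvMx m, c + ((pvNidx l).length : Int)) := by
  induction l generalizing s m c with
  | nil => exact ⟨s, by simp [pvSegs, pvNidx]⟩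
  | cons x xs ih =>
    by_cases hx : x < 0
    · obtain ⟨r, hr⟩ := ih 0 (pvMx m s) (c + 1)
      refine ⟨r, ?_⟩
      have hstep : pvStepA (s, m, c) x = (0, pvMx m s, c + 1) := by
        simp [pvStepA, pvMx, hx, not_le.mpr hx]
      simp only [List.foldl_cons, hstep, hr, pvSegs, pvNidx, hx, if_true,
        List.length_cons, List.length_map, Prod.mk.injEq]
      exact ⟨trivial, trivial, by push_cast; ring⟩
    · obtain ⟨r, hr⟩ := ih (s + x) m c
      refine ⟨r, ?_⟩
      have hstep : pvStepA (s, m, c) x = (s + x, m, c) := by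
        simp [pvStepA, hx, not_lt.mp hx]
      simp [List.foldl_cons, hstep, hr, pvSegs, pvNidx, hx]

-- B's fold over the Int-cast index pairs equals pvMx folded over pvPairSums
lemma pvBfold (t : List Int) :
    (((pvNidx t).map (fun (k : Nat) => (k : Int))).zip (((pvNidx t).map (fun (k : Nat) => (k : Int))).tail)).foldl
        (pvPairStep t) 0
      = (pvPairSums t).foldl pvMx 0 := by
  rw [pvMapTail, List.zip_map, List.foldl_map]
  unfold pvPairSums
  rw [List.foldl_map]
  have hfun : (fun (b : Int) (p : Nat × Nat) =>
        pvPairStep t b (Prod.map (fun (k : Nat) => (k : Int)) (fun (k : Nat) => (k : Int)) p))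
      = (fun (b : Int) (p : Nat × Nat) =>
        pvMx b (((t.drop (p.1 + 1)).take (p.2 - (p.1 + 1))).sum)) := by
    funext b p
    have hc : ((p.1 : Int) + 1) = ((p.1 + 1 : Nat) : Int) := by push_cast; ring
    simp only [pvPairStep, pvMx, Prod.map, hc, PySem.List.slice_natCast, gt_iff_lt]
  rw [hfun]

-- ===== VERDICT (by name: the statement is the Claim_ definition above) =====
theorem max_sum_between_two_negatives_spec : Claim_equal_max_sum_between_two_negatives := by
  intro arr _
  unfold Spec_max_sum_between_two_negatives max_sum_between_two_negatives max_sum_between_two_negatives_alt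
  have hslice : PySem.List.slice arr (some (pvFirstNeg arr)) none = pvStrip arr := by
    rw [pvFirstNeg_eq, PySem.List.slice_from_natCast, pvDrop_fnn]
  obtain ⟨r, hr⟩ := pvLoopA (pvStrip arr) 0 0 0
  have hz : (pvNidx (pvStrip arr)).map (fun (k : Nat) => (0 : Int) + (k : Int))
      = (pvNidx (pvStrip arr)).map (fun (k : Nat) => (k : Int)) :=
    List.map_congr_left (by intro k _; ring)
  simp only [hslice, pvEnum_filter (pvStrip arr) 0, hz, hr, List.length_map]
  by_cases hlen : (pvNidx (pvStrip arr)).length < 2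
  · have h1 : (0 : Int) + ((pvNidx (pvStrip arr)).length : Int) < 2 := by omega
    rw [if_pos h1, if_pos hlen]
  · have h1 : ¬ ((0 : Int) + ((pvNidx (pvStrip arr)).length : Int) < 2) := by omega
    rw [if_neg h1, if_neg hlen, pvBfold, pvPairSums_eq]
    cases htc : pvStrip arr with
    | nil => rw [htc] at hlen; simp [pvNidx] at hlen
    | cons y ys =>
      have hy : y < 0 := pvStrip_head arr y ys htc
      have hseg : pvSegs (y :: ys) 0 = 0 :: pvSegs ys 0 := by simp [pvSegs, hy]
      rw [hseg]
      simp [pvMx]
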